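-- pv_equiv track=rewrite | github.com/ScottCarda/Ternary-Emulator | Emulator/Emulator/Register/Register.py | DecToHept
-- ===== SOURCE A (Python) =====
-- def DecToHept( dec, digits=0 ):
--     dig = 0
--
--     hept = chr(ord('@') + dec % 27)
--     dec //= 27
--     dig += 1
--     while dec > 0 and dig != digits:
--         hept = chr(ord('@') + dec % 27) + hept
--         dec //= 27
--         dig += 1
--
--     while dig < digits:
--         hept = '@' + hept
--         dig += 1
--
--     return hept
-- ===== SOURCE B (Python) =====
-- def DecToHept(dec, digits=0):
--     # build-then-fit: full base-27 digit list (LSB-first), then truncate/pad in one shot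
--     ds = [dec % 27]
--     dec //= 27
--     while dec > 0:
--         ds.append(dec % 27)
--         dec //= 27
--     s = ''.join(chr(ord('@') + d) for d in reversed(ds))
--     if digits > 0:
--         if len(s) > digits:
--             return s[-digits:]
--         return '@' * (digits - len(s)) + s
--     return s
-- ===== Notes on version B (the rewrite author's own statement) =====
-- stated objective: faster
-- what changed: A interleaves truncation with the conversion loop (stop when dig hits digits) and pads by prepending '@' one character at a time; B builds the full LSB-first base-27 digit list with one unconstrained loop, joins it once, then fits in a separate pass by negative-index slicing (s[-digits:]) or a single '@'*(digits-len(s)) pad.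
import Mathlib
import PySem

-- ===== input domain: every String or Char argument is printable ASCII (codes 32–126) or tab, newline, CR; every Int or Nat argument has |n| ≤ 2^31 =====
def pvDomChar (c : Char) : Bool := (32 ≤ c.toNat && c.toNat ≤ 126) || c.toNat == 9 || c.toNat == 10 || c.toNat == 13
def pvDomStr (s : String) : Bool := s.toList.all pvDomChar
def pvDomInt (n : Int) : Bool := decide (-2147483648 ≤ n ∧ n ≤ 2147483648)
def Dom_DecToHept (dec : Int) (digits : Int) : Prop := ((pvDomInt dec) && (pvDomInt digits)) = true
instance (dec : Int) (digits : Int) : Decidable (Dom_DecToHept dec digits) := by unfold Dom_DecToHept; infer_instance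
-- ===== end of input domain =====

-- B restructures A's truncate-while-converting loop into build-then-fit: one unconstrained
-- digit loop, then a separate slice/pad pass built in one shot instead of A's repeated
-- one-character string prepends (objective: faster; measured).

-- termination helper cited by the ports' decreasing_by (dec strictly shrinks under //27)
theorem pvFloordiv27_toNat_lt (dec : Int) (h : 0 < dec) :
    (PySem.Int.floordiv dec 27).toNat < dec.toNat := by
  rw [PySem.Int.floordiv_eq_ediv_of_pos (by norm_num)]
  omega

-- ===== PORT A =====
-- while dec > 0 and dig != digits: hept = chr(ord('@') + dec % 27) + hept; dec //= 27; dig += 1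
def aLoop1 (digits : Int) (hept : List Char) (dec : Int) (dig : Int) : List Char × Int :=
  if h : 0 < dec ∧ dig ≠ digits then
    aLoop1 digits (Char.ofNat (64 + PySem.Int.mod dec 27).toNat :: hept)
      (PySem.Int.floordiv dec 27) (dig + 1)
  else (hept, dig)
termination_by dec.toNat
decreasing_by exact pvFloordiv27_toNat_lt dec h.1

-- while dig < digits: hept = '@' + hept; dig += 1
def aLoop2 (digits : Int) (hept : List Char) (dig : Int) : List Char :=
  if dig < digits then aLoop2 digits ('@' :: hept) (dig + 1) else hept
termination_by (digits - dig).toNat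
decreasing_by omega

def DecToHept (dec : Int) (digits : Int) : String :=
  let hept : List Char := [Char.ofNat (64 + PySem.Int.mod dec 27).toNat]
  let p := aLoop1 digits hept (PySem.Int.floordiv dec 27) 1
  String.mk (aLoop2 digits p.1 p.2)

-- ===== PORT B =====
-- ds.append(dec % 27); dec //= 27   while dec > 0   (full LSB-first digit list)
def bDigs (dec : Int) (ds : List Int) : List Int :=
  if 0 < dec then bDigs (PySem.Int.floordiv dec 27) (ds ++ [PySem.Int.mod dec 27]) else ds
termination_by dec.toNat
decreasing_by exact pvFloordiv27_toNat_lt dec (by assumption)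

def bChr (d : Int) : Char := Char.ofNat (64 + d).toNat   -- chr(ord('@') + d)

def DecToHept_alt (dec : Int) (digits : Int) : String :=
  let ds := bDigs (PySem.Int.floordiv dec 27) [PySem.Int.mod dec 27]
  let s : List Char := ds.reverse.map bChr                 -- ''.join(chr(ord('@')+d) for d in reversed(ds))
  if 0 < digits then
    if digits < (s.length : Int) then
      String.mk (PySem.List.slice s (some (-digits)) none)  -- s[-digits:]
    else
      String.mk (List.replicate (digits - (s.length : Int)).toNat '@' ++ s)  -- '@'*(digits-len(s)) + s
  else String.mk s

-- ===== PRECONDITION & SPEC =====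
def Spec_DecToHept (dec : Int) (digits : Int) (out : String) : Prop := out = DecToHept_alt dec digits
instance (dec : Int) (digits : Int) (out : String) : Decidable (Spec_DecToHept dec digits out) := by unfold Spec_DecToHept; infer_instance

-- ===== CLAIM (what is proved, stated in full; the proofs are below) =====
def Claim_equal_DecToHept : Prop := ∀ (dec : Int) (digits : Int), Dom_DecToHept dec digits → Spec_DecToHept dec digits (DecToHept dec digits)

-- ===== LEMMAS AND PROOFS =====

-- number of digits A's first loop emits (beyond the mandatory one)
def pvK (dec dig digits : Int) : Nat :=
  if 0 < digits then min (bDigs dec []).length (digits - dig).toNat else (bDigs dec []).length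

-- accumulator lemma for B's digit loop
theorem bDigs_acc (dec : Int) (ds : List Int) : bDigs dec ds = ds ++ bDigs dec [] := by
  by_cases h : 0 < dec
  · rw [bDigs, if_pos h]
    conv_rhs => rw [bDigs, if_pos h]
    rw [bDigs_acc (PySem.Int.floordiv dec 27) (ds ++ [PySem.Int.mod dec 27]),
        bDigs_acc (PySem.Int.floordiv dec 27) ([] ++ [PySem.Int.mod dec 27])]
    simp
  · rw [bDigs, if_neg h]
    rw [bDigs, if_neg h]
    simp
termination_by dec.toNat
decreasing_by all_goals exact pvFloordiv27_toNat_lt dec h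

theorem bDigs_cons (dec : Int) (h : 0 < dec) :
    bDigs dec [] = PySem.Int.mod dec 27 :: bDigs (PySem.Int.floordiv dec 27) [] := by
  rw [bDigs, if_pos h, bDigs_acc]
  simp

theorem bDigs_nil (dec : Int) (h : ¬ 0 < dec) : bDigs dec [] = [] := by
  rw [bDigs, if_neg h]

-- characterisation of A's first loop in terms of B's digit list
theorem aLoop1_spec (dec dig digits : Int) (hept : List Char)
    (hd : 0 < dig) (hle : 0 < digits → dig ≤ digits) :
    aLoop1 digits hept dec dig =
      (((bDigs dec []).take (pvK dec dig digits)).reverse.map bChr ++ hept,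
        dig + pvK dec dig digits) := by
  by_cases h : 0 < dec
  · by_cases hstop : dig = digits
    · rw [aLoop1, dif_neg (by simp [hstop])]
      have hk : pvK dec dig digits = 0 := by
        simp only [pvK]
        rw [if_pos (by omega)]
        omega
      simp [hk]
    · rw [aLoop1, dif_pos ⟨h, hstop⟩]
      rw [aLoop1_spec (PySem.Int.floordiv dec 27) (dig + 1) digits _ (by omega)
          (by intro hp; have := hle hp; omega)]
      have hk : pvK dec dig digits = pvK (PySem.Int.floordiv dec 27) (dig + 1) digits + 1 := by
        simp only [pvK, bDigs_cons dec h, List.length_cons]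
        split_ifs with hp
        · have := hle hp; omega
        · rfl
      rw [hk, bDigs_cons dec h]
      simp [bChr]
      omega
  · rw [aLoop1, dif_neg (by intro hc; exact h hc.1)]
    have hk : pvK dec dig digits = 0 := by simp [pvK, bDigs_nil dec h]
    simp [hk, bDigs_nil dec h]
termination_by dec.toNat
decreasing_by exact pvFloordiv27_toNat_lt dec h

-- characterisation of A's padding loop
theorem aLoop2_spec (digits dig : Int) (hept : List Char) :
    aLoop2 digits hept dig = List.replicate (digits - dig).toNat '@' ++ hept := by
  by_cases h : dig < digits
  · rw [aLoop2, if_pos h, aLoop2_spec digits (dig + 1) ('@' :: hept)]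
    have he : (digits - dig).toNat = (digits - (dig + 1)).toNat + 1 := by omega
    rw [he, List.replicate_succ']
    simp
  · rw [aLoop2, if_neg h]
    have he : (digits - dig).toNat = 0 := by omega
    simp [he]
termination_by (digits - dig).toNat
decreasing_by omega

theorem main_eq (dec digits : Int) : DecToHept dec digits = DecToHept_alt dec digits := by
  simp only [DecToHept, DecToHept_alt]
  rw [aLoop1_spec _ _ _ _ (by omega) (by omega), aLoop2_spec,
      bDigs_acc (PySem.Int.floordiv dec 27) [PySem.Int.mod dec 27]]
  simp only [pvK, List.singleton_append]
  generalize bDigs (PySem.Int.floordiv dec 27) [] = ds'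
  have hc : Char.ofNat (64 + PySem.Int.mod dec 27).toNat = bChr (PySem.Int.mod dec 27) := rfl
  rw [hc]
  by_cases hp : 0 < digits
  · rw [if_pos hp, if_pos hp]
    have hslen : ((PySem.Int.mod dec 27 :: ds').reverse.map bChr).length = ds'.length + 1 := by
      simp
    by_cases hbig : digits < (ds'.length : Int) + 1
    · rw [if_pos (by rw [hslen]; exact_mod_cast hbig)]
      have hk : min ds'.length (digits - 1).toNat = (digits - 1).toNat := by omega
      have hpad : (digits - (1 + ((digits - 1).toNat : Int))).toNat = 0 := by omega
      rw [hk, hpad]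
      have hneg : -digits = -((digits.toNat : Nat) : Int) := by omega
      rw [hneg, PySem.List.slice_from_neg_natCast _ _ (by omega)]
      simp only [List.map_reverse]
      rw [List.drop_reverse]
      simp only [List.length_reverse, List.length_map, List.length_cons]
      have htk : ds'.length + 1 - (ds'.length + 1 - digits.toNat) = (digits - 1).toNat + 1 := by
        omega
      rw [htk]
      simp [List.map_take]
    · rw [if_neg (by rw [hslen]; push_cast; omega)]
      have hk : min ds'.length (digits - 1).toNat = ds'.length := by omega
      rw [hk, List.take_length, hslen]
      have hpad : (digits - (1 + (ds'.length : Int))).toNat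
          = (digits - ((ds'.length + 1 : Nat) : Int)).toNat := by push_cast; omega
      rw [hpad]
      simp [List.map_reverse]
  · rw [if_neg hp, if_neg hp, List.take_length]
    have hpad : (digits - (1 + (ds'.length : Int))).toNat = 0 := by omega
    rw [hpad]
    simp [List.map_reverse]

-- ===== VERDICT (by name: the statement is the Claim_ definition above) =====
theorem DecToHept_spec : Claim_equal_DecToHept := by
  intro dec digits _
  unfold Spec_DecToHept
  exact main_eq dec digits
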